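-- pv_equiv track=rewrite | github.com/IsmaeelAkram/icloud-linux | hydrate.py | path_allowed
-- ===== SOURCE A (Python) =====
-- def path_allowed(path, sync_paths, exclude_paths):
--     """Return True if this path should be hydrated.
--
--     Mirrors ICloudSyncEngine._path_allowed() exactly:
--       1. exclude_paths deny-list wins — matching prefix blocks hydration.
--       2. sync_paths allow-list — if set, only matching prefixes hydrate.
--          None means allow all (minus exclusions).
--     """
--     # 1. Deny-list
--     for prefix in exclude_paths:
--         if path == prefix or path.startswith(prefix + "/"):
--             return False
--
--     # 2. Allow-list
--     if sync_paths is None: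
--         return True
--     for prefix in sync_paths:
--         if path == prefix or path.startswith(prefix + "/"):
--             return True
--     return False
-- ===== SOURCE B (Python) =====
-- def path_allowed(path, sync_paths, exclude_paths):
--     # Build once the set of all "ancestor" prefixes of path (path itself and
--     # every prefix ending just before a '/'), then test prefix lists by set
--     # membership instead of scanning each prefix with startswith.
--     anc = {path} | {path[:i] for i, c in enumerate(path) if c == '/'}
--     if not anc.isdisjoint(exclude_paths):
--         return False
--     return sync_paths is None or not anc.isdisjoint(sync_paths)
-- ===== Notes on version B (the rewrite author's own statement) =====
-- stated objective: alternative
-- what changed: B precomputes the set of path's own ancestor prefixes (path and every prefix ending before a '/') once and replaces the per-prefix startswith scans by set-disjointness tests, trading per-prefix string comparison for one hash lookup per listed prefix.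
import Mathlib
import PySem

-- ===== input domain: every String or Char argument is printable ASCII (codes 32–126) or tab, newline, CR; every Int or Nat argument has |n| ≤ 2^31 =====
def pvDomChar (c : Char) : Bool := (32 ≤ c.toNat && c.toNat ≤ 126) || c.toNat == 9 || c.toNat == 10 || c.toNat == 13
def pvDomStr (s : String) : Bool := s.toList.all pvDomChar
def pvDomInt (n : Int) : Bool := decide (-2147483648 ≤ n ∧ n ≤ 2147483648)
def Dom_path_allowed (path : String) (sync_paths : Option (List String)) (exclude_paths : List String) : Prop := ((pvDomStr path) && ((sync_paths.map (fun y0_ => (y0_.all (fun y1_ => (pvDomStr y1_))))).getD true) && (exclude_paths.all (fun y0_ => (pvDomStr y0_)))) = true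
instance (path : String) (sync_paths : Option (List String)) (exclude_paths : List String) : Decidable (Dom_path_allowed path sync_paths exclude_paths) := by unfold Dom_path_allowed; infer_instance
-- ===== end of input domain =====

-- B: one-line change of strategy — precompute path's own ancestor prefixes as a set, test the prefix lists by set disjointness (alternative strategy; a timing run did not confirm a speed-up).
-- ===== PORT A =====
-- 'path == prefix or path.startswith(prefix + "/")', on code-point lists (String '==' is toList equality)
def paMatch (path pfx : List Char) : Bool :=
  path == pfx || PySem.Chars.startswith path (pfx ++ ['/'])

def path_allowed (path : String) (sync_paths : Option (List String)) (exclude_paths : List String) : Bool :=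
  -- deny-list loop with early 'return False'
  if (exclude_paths.map String.toList).any (paMatch path.toList) then false
  else
    match sync_paths with
    | none => true
    | some sp => (sp.map String.toList).any (paMatch path.toList)   -- allow-list loop with early 'return True'

-- ===== PORT B =====
-- anc = {path} | {path[:i] for i, c in enumerate(path) if c == '/'}
def ancSet (cs : List Char) : PySem.Set (List Char) :=
  PySem.Set.union [cs]
    (PySem.Set.ofList (((PySem.List.enumerate cs 0).filter (fun q => q.2 == '/')).map
      (fun q => PySem.List.slice cs none (some q.1))))

def path_allowed_alt (path : String) (sync_paths : Option (List String)) (exclude_paths : List String) : Bool :=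
  let anc := ancSet path.toList
  if !(PySem.Set.isdisjoint anc (exclude_paths.map String.toList)) then false
  else
    match sync_paths with
    | none => true
    | some sp => !(PySem.Set.isdisjoint anc (sp.map String.toList))

-- ===== PRECONDITION & SPEC =====
def Spec_path_allowed (path : String) (sync_paths : Option (List String)) (exclude_paths : List String) (out : Bool) : Prop := out = path_allowed_alt path sync_paths exclude_paths
instance (path : String) (sync_paths : Option (List String)) (exclude_paths : List String) (out : Bool) : Decidable (Spec_path_allowed path sync_paths exclude_paths out) := by unfold Spec_path_allowed; infer_instance

-- ===== CLAIM (what is proved, stated in full; the proofs are below) =====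
def Claim_equal_path_allowed : Prop := ∀ (path : String) (sync_paths : Option (List String)) (exclude_paths : List String), Dom_path_allowed path sync_paths exclude_paths → Spec_path_allowed path sync_paths exclude_paths (path_allowed path sync_paths exclude_paths)

-- ===== LEMMAS AND PROOFS =====

-- ===== VERDICT (by name: the statement is the Claim_ definition above) =====
-- a list followed by one char is a prefix of cs iff that char sits in cs right after the list
theorem append_single_prefix_iff (p : List Char) (c : Char) (cs : List Char) :
    (p ++ [c]) <+: cs ↔ ∃ k, ∃ h : k < cs.length, cs[k] = c ∧ p = cs.take k := by
  constructor
  · rintro ⟨t, ht⟩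
    refine ⟨p.length, ?_, ?_, ?_⟩ <;> subst ht <;>
      simp [List.getElem_append_right]
  · rintro ⟨k, hk, hc, hp⟩
    refine ⟨cs.drop (k + 1), ?_⟩
    subst hp
    rw [List.append_assoc]
    simp only [List.singleton_append, ← hc]
    rw [← List.drop_eq_getElem_cons hk, List.take_append_drop]

-- ancestor-set membership = A's prefix test
theorem mem_ancSet_iff (cs p : List Char) :
    p ∈ ancSet cs ↔ (cs = p ∨ (p ++ ['/']) <+: cs) := by
  rw [append_single_prefix_iff]
  unfold ancSet
  rw [PySem.Set.mem_union]
  simp only [List.mem_singleton, PySem.Set.mem_ofList, List.mem_map, List.mem_filter,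
    PySem.List.mem_enumerate_iff, beq_iff_eq]
  constructor
  · rintro (h | ⟨q, ⟨⟨k, hk, rfl⟩, hc⟩, rfl⟩)
    · exact Or.inl h.symm
    · refine Or.inr ⟨k, hk, hc, ?_⟩
      have : ((0 : Int) + (k : Int)) = ((k : Nat) : Int) := by omega
      rw [this, PySem.List.slice_to_natCast]
  · rintro (h | ⟨k, hk, hc, hp⟩)
    · exact Or.inl h.symm
    · refine Or.inr ⟨((0 : Int) + (k : Int), cs[k]), ⟨⟨k, hk, rfl⟩, hc⟩, ?_⟩
      have : ((0 : Int) + (k : Int)) = ((k : Nat) : Int) := by omega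
      rw [this, PySem.List.slice_to_natCast, hp]

theorem any_paMatch_eq (cs : List Char) (l : List (List Char)) :
    l.any (paMatch cs) = !(PySem.Set.isdisjoint (ancSet cs) l) := by
  rw [Bool.eq_iff_iff]
  simp only [List.any_eq_true, Bool.not_eq_true', paMatch, Bool.or_eq_true, beq_iff_eq,
    PySem.Chars.startswith_iff]
  constructor
  · rintro ⟨q, hq, hm⟩
    refine Bool.eq_false_iff.mpr fun hd => ?_
    exact ((PySem.Set.isdisjoint_iff _ _).mp hd) q ((mem_ancSet_iff cs q).mpr hm) hq
  · intro hd
    by_contra h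
    push Not at h
    have ht : (ancSet cs).isdisjoint l = true := by
      rw [PySem.Set.isdisjoint_iff]
      intro x hx hxl
      rcases (mem_ancSet_iff cs x).mp hx with heq | hpre
      · exact (h x hxl).1 heq
      · exact (h x hxl).2 hpre
    rw [ht] at hd
    simp at hd

theorem path_allowed_spec : Claim_equal_path_allowed := by
  intro path sync_paths exclude_paths _
  unfold Spec_path_allowed path_allowed path_allowed_alt
  simp only [any_paMatch_eq]
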